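-- pv_equiv track=rewrite | github.com/zdzc/penyisihan-idefuse-2019 | src/c.py | convert
-- ===== SOURCE A (Python) =====
-- VOWELS = set('aeiou')
--
-- def char_type(ch):
--     if ch in VOWELS:
--         return 1
--     return 2
--
-- def convert(string):
--     output = []
--     for i, ch in enumerate(string):
--         if len(string) == 1:
--             other = []
--         elif i == 0:
--             other = [string[i + 1]]
--         elif i == len(string) - 1:
--             other = [string[i - 1]]
--         else:
--             other = [string[i - 1], string[i + 1]]
--
--         if any(char_type(ch) == char_type(o) for o in other):
--             output.append(ch.upper())
--         else:
--             output.append(ch)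
--     return ''.join(output)
-- ===== SOURCE B (Python) =====
-- VOWELS = set('aeiou')
--
-- def char_type(ch):
--     if ch in VOWELS:
--         return 1
--     return 2
--
-- def convert(string):
--     t = [char_type(c) for c in string]
--     e = [x == y for x, y in zip(t, t[1:])]
--     upper = [a or b for a, b in zip(e + [False], [False] + e)]
--     return ''.join(c.upper() if u else c for c, u in zip(string, upper))
-- ===== Notes on version B (the rewrite author's own statement) =====
-- stated objective: faster
-- what changed: Replaces per-character neighbor inspection (position branching to build a neighbor list, then any()) by edge-based marking: zip the type list with its shift to get same-type edges, OR the edge list with its shift to get the uppercase mask, then zip with the string; this removes all per-character indexing, branching and temporary list allocation.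
import Mathlib
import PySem

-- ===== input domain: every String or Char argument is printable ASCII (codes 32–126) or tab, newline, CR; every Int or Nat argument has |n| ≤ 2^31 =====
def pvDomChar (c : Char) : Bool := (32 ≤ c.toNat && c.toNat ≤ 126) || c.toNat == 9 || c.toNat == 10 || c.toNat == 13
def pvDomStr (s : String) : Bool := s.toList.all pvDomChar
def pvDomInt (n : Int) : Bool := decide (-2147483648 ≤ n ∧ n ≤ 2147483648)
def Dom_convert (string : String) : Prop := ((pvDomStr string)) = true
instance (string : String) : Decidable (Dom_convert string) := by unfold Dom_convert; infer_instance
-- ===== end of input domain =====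

-- B re-implements convert by edge-based marking (zip the type list with its shift) instead of
-- per-position neighbor lists; same asymptotics, measured faster (constant factor) in a timing run.

-- ===== PORT A =====
-- char_type: 1 for a lowercase vowel, 2 otherwise (shared helper of both Python files)
def charType (ch : Char) : Int := if ch ∈ ['a', 'e', 'i', 'o', 'u'] then 1 else 2

-- faithful port of A; string[i±1] is always in range in the branch where it is taken,
-- `(pyGet? …).toList` is the one-element list Python builds there.
def convert (string : String) : String :=
  let l := string.toList
  let output := (PySem.List.enumerate l 0).foldl (fun out p =>
    let i := p.1
    let ch := p.2
    let other : List Char :=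
      if l.length = 1 then []
      else if i = 0 then (PySem.List.pyGet? l (i + 1)).toList
      else if i = (l.length : Int) - 1 then (PySem.List.pyGet? l (i - 1)).toList
      else (PySem.List.pyGet? l (i - 1)).toList ++ (PySem.List.pyGet? l (i + 1)).toList
    if other.any (fun o => charType ch == charType o) then out ++ [PySem.Chars.upperChar ch]
    else out ++ [ch]) []
  String.ofList output

-- ===== PORT B =====
def convert_alt (string : String) : String :=
  let l := string.toList
  let t := l.map charType
  let e := List.zipWith (fun a b => a == b) t t.tail
  let upper := List.zipWith (fun a b => a || b) (e ++ [false]) (false :: e)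
  String.ofList (List.zipWith (fun c u => if u then PySem.Chars.upperChar c else c) l upper)

-- ===== PRECONDITION & SPEC =====
def Spec_convert (string : String) (out : String) : Prop := out = convert_alt string
instance (string : String) (out : String) : Decidable (Spec_convert string out) := by unfold Spec_convert; infer_instance

-- ===== CLAIM (what is proved, stated in full; the proofs are below) =====
def Claim_equal_convert : Prop := ∀ (string : String), Dom_convert string → Spec_convert string (convert string)

-- ===== LEMMAS AND PROOFS =====

-- the character A appends for position/char p (proof-only helper)
def pvStepA (l : List Char) (p : Int × Char) : Char :=
  let i := p.1
  let ch := p.2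
  let other : List Char :=
    if l.length = 1 then []
    else if i = 0 then (PySem.List.pyGet? l (i + 1)).toList
    else if i = (l.length : Int) - 1 then (PySem.List.pyGet? l (i - 1)).toList
    else (PySem.List.pyGet? l (i - 1)).toList ++ (PySem.List.pyGet? l (i + 1)).toList
  if other.any (fun o => charType ch == charType o) then PySem.Chars.upperChar ch else ch

-- A's fold equals B's zip pipeline, on the underlying character list
theorem convert_key (l : List Char) :
    (PySem.List.enumerate l 0).foldl (fun out p =>
      let i := p.1
      let ch := p.2
      let other : List Char :=
        if l.length = 1 then []
        else if i = 0 then (PySem.List.pyGet? l (i + 1)).toList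
        else if i = (l.length : Int) - 1 then (PySem.List.pyGet? l (i - 1)).toList
        else (PySem.List.pyGet? l (i - 1)).toList ++ (PySem.List.pyGet? l (i + 1)).toList
      if other.any (fun o => charType ch == charType o) then out ++ [PySem.Chars.upperChar ch]
      else out ++ [ch]) [] =
    List.zipWith (fun c u => if u then PySem.Chars.upperChar c else c) l
      (List.zipWith (fun a b => a || b)
        ((List.zipWith (fun a b => a == b) (l.map charType) (l.map charType).tail) ++ [false])
        (false :: List.zipWith (fun a b => a == b) (l.map charType) (l.map charType).tail)) := by
  have hbody : (fun (out : List Char) (p : Int × Char) =>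
      let i := p.1
      let ch := p.2
      let other : List Char :=
        if l.length = 1 then []
        else if i = 0 then (PySem.List.pyGet? l (i + 1)).toList
        else if i = (l.length : Int) - 1 then (PySem.List.pyGet? l (i - 1)).toList
        else (PySem.List.pyGet? l (i - 1)).toList ++ (PySem.List.pyGet? l (i + 1)).toList
      if other.any (fun o => charType ch == charType o) then out ++ [PySem.Chars.upperChar ch]
      else out ++ [ch]) = (fun out p => out ++ [pvStepA l p]) := by
    funext out p
    simp only [pvStepA]
    exact (apply_ite (fun x => out ++ [x]) _ _ _).symm
  rw [hbody, PySem.List.foldl_append_singleton_eq_map, List.nil_append]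
  set t := l.map charType with ht
  set e := List.zipWith (fun a b => a == b) t t.tail with he
  have hte : t.length = l.length := by simp [ht]
  have hel : e.length = l.length - 1 := by simp [he, hte]
  apply List.ext_getElem
  · simp only [List.length_map, PySem.List.length_enumerate, List.length_zipWith,
      List.length_append, List.length_cons, hel]
    cases l <;> simp
  · intro i h1 h2
    rw [List.getElem_map, PySem.List.getElem_enumerate]
    have hi : i < l.length := by simpa using h1
    have hE : ∀ (j : Nat) (hj : j + 1 < l.length),
        e[j]'(by omega) = (charType (l[j]'(by omega)) == charType (l[j+1]'hj)) := by
      intro j hj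
      simp only [he, List.getElem_zipWith, List.getElem_tail, ht, List.getElem_map]
    rw [List.getElem_zipWith, List.getElem_zipWith]
    simp only [pvStepA, zero_add]
    by_cases hn1 : l.length = 1
    · -- single character: no neighbor, never uppercased
      have hi0 : i = 0 := by omega
      have he0 : e = [] := by apply List.eq_nil_of_length_eq_zero; omega
      subst hi0
      simp [hn1, he0]
    · have hn2 : 2 ≤ l.length := by omega
      by_cases hi0 : i = 0
      · -- first character: only the right neighbor
        subst hi0
        rw [if_neg hn1, if_pos (show (((0 : Nat) : Int) = 0) by norm_num),
          show (((0 : Nat) : Int) + 1) = ((1 : Nat) : Int) by norm_num,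
          PySem.List.pyGet?_natCast, List.getElem?_eq_getElem (show 1 < l.length by omega)]
        have hx : (e ++ [false])[0]'(by simp) = e[0]'(by omega) :=
          List.getElem_append_left (by omega)
        simp [hx, hE 0 (by omega)]
      · have hiz : ¬(((i : Nat) : Int) = 0) := by simpa using hi0
        have hcons : (false :: e)[i]'(by simp [hel]; omega) = e[i-1]'(by omega) := by
          rw [List.getElem_cons]
          simp [hi0]
        have hm1 : ((i : Nat) : Int) - 1 = ((i - 1 : Nat) : Int) := by omega
        by_cases hil : i = l.length - 1
        · -- last character: only the left neighbor
          have hlast : (((i : Nat) : Int) = (l.length : Int) - 1) := by omega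
          rw [if_neg hn1, if_neg hiz, if_pos hlast, hm1, PySem.List.pyGet?_natCast,
            List.getElem?_eq_getElem (show i - 1 < l.length by omega)]
          have hx : (e ++ [false])[i]'(by simp only [List.length_append, List.length_cons, List.length_nil]; omega) = false := by
            rw [List.getElem_append_right (by omega)]
            simp
          simp only [hx, hcons, hE (i-1) (by omega), Option.toList_some, List.any_cons,
            List.any_nil, Bool.or_false, Bool.false_or,
            Nat.sub_add_cancel (show 1 ≤ i by omega)]
          rw [Bool.beq_comm]
        · -- interior character: both neighbors
          have hlast : ¬(((i : Nat) : Int) = (l.length : Int) - 1) := by omega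
          have hp1 : ((i : Nat) : Int) + 1 = ((i + 1 : Nat) : Int) := by omega
          rw [if_neg hn1, if_neg hiz, if_neg hlast, hm1, hp1,
            PySem.List.pyGet?_natCast, PySem.List.pyGet?_natCast,
            List.getElem?_eq_getElem (show i - 1 < l.length by omega),
            List.getElem?_eq_getElem (show i + 1 < l.length by omega)]
          have hx : (e ++ [false])[i]'(by simp only [List.length_append, List.length_cons, List.length_nil]; omega) = e[i]'(by omega) :=
            List.getElem_append_left (by omega)
          simp only [hx, hcons, hE (i-1) (by omega), hE i (by omega), Option.toList_some,
            List.any_append, List.any_cons, List.any_nil, Bool.or_false,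
            Nat.sub_add_cancel (show 1 ≤ i by omega)]
          simp only [Bool.or_comm, Bool.beq_comm]
          rw [Bool.beq_comm (a := charType (l[i+1]'(by omega))) (b := charType (l[i]'hi))]

-- ===== VERDICT (by name: the statement is the Claim_ definition above) =====
theorem convert_spec : Claim_equal_convert := by
  intro s _
  unfold Spec_convert convert convert_alt
  exact congrArg String.ofList (convert_key s.toList)
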